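-- pv_equiv track=rewrite | github.com/martinabaizan/Game-of-life | game_of_life.py | right_neighbours
-- ===== SOURCE A (Python) =====
-- def right_neighbours(board,size,x,y):
--     neighbours = [] #create an empty list in which the number of neighbours of each coordinate (odrdered as reading) will be appended
--     for x in range(size):
--         for y in range(size -1):
--             neighbours.append(board[x][y+1]) #first column has second column as right neighbours, etc.
--         neighbours.append(0) #last column has no right neighbours (compute as 0)
--     matrix_right_neighbours = [neighbours[x:x + size] for x in range(0, len(neighbours), size)] #create matrix (10 "sublists" inside list neighbours)
--     return matrix_right_neighbours
-- ===== SOURCE B (Python) =====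
-- def right_neighbours(board, size, x, y):
--     # Build each row directly: right neighbours are the slice 1..size-1, last column 0.
--     result = []
--     for i in range(size):
--         result.append(board[i][1:size] + [0])
--     return result
-- ===== Notes on version B (the rewrite author's own statement) =====
-- stated objective: simpler
-- what changed: B builds each output row directly as board[i][1:size] + [0], removing A's flatten-into-one-list phase and the subsequent slice-reshape phase.
-- outside the precondition, e.g. on right_neighbours([], 1, 0, 0): A returns [[0]], B raises IndexError; on right_neighbours([[1]], 2, 0, 0): A raises IndexError, B raises IndexError; on right_neighbours([], 0, 0, 0): A raises ValueError, B returns []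
import Mathlib
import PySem

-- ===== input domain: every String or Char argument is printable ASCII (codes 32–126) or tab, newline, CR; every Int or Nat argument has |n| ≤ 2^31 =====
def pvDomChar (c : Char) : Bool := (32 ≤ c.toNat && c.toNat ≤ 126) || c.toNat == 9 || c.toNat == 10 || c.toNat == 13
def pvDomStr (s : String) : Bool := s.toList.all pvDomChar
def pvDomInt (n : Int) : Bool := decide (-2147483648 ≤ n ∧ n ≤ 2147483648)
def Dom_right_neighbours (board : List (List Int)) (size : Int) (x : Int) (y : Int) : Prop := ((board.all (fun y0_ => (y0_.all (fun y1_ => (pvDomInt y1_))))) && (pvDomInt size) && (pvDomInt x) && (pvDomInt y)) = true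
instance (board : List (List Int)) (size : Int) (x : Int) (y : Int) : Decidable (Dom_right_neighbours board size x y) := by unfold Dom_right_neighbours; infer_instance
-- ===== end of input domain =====

-- B replaces A's flatten-then-reshape with direct per-row construction (simpler; same return value).

-- ===== PORT A =====
-- A: flat list of all right-neighbour values (0 for the last column), then reshaped into rows of length `size`.
def right_neighbours (board : List (List Int)) (size : Int) (x : Int) (y : Int) : List (List Int) :=
  let neighbours : List Int :=
    (PySem.List.pyRange 0 size 1).foldl (fun acc xi =>
      ((PySem.List.pyRange 0 (size - 1) 1).foldl (fun acc2 yi =>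
          acc2 ++ [PySem.List.pyGetD (PySem.List.pyGetD board xi []) (yi + 1) 0]) acc) ++ [0]) []
  (PySem.List.pyRange 0 (neighbours.length : Int) size).foldl
    (fun m xi => m ++ [PySem.List.slice neighbours (some xi) (some (xi + size))]) []

-- ===== PORT B =====
-- B: each row built directly as board[i][1:size] + [0].
def right_neighbours_alt (board : List (List Int)) (size : Int) (x : Int) (y : Int) : List (List Int) :=
  (PySem.List.pyRange 0 size 1).foldl (fun result i =>
    result ++ [PySem.List.slice (PySem.List.pyGetD board i []) (some 1) (some size) ++ [0]]) []

-- ===== PRECONDITION & SPEC =====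
-- Pre_ excludes: size = 0 (A raises ValueError); for 0 < size, boards with fewer than size rows or a
-- row among the first size rows shorter than size (A raises IndexError, except in the degenerate case
-- size = 1 where A ignores the board and returns [[0]] while B's row indexing raises IndexError).
def Pre_right_neighbours (board : List (List Int)) (size : Int) (x : Int) (y : Int) : Prop :=
  size ≠ 0 ∧ (0 < size → size ≤ (board.length : Int) ∧ ∀ r ∈ board.take size.toNat, size ≤ (r.length : Int))
instance (board : List (List Int)) (size : Int) (x : Int) (y : Int) : Decidable (Pre_right_neighbours board size x y) := by unfold Pre_right_neighbours; infer_instance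
def pvWitness_right_neighbours : List (List Int) × Int × Int × Int := ([[1, 2], [3, 4]], 2, 0, 0)

def Spec_right_neighbours (board : List (List Int)) (size : Int) (x : Int) (y : Int) (out : List (List Int)) : Prop := out = right_neighbours_alt board size x y
instance (board : List (List Int)) (size : Int) (x : Int) (y : Int) (out : List (List Int)) : Decidable (Spec_right_neighbours board size x y out) := by unfold Spec_right_neighbours; infer_instance

-- ===== CLAIM (what is proved, stated in full; the proofs are below) =====
def Claim_equal_right_neighbours : Prop := ∀ (board : List (List Int)) (size : Int) (x : Int) (y : Int), Dom_right_neighbours board size x y → Pre_right_neighbours board size x y → Spec_right_neighbours board size x y (right_neighbours board size x y)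

-- ===== LEMMAS AND PROOFS =====

theorem pv_rowvals (row : List Int) (m : Nat) (h : m + 1 ≤ row.length) :
    (PySem.List.pyRange 0 ((m : Nat) : Int) 1).map (fun yi => PySem.List.pyGetD row (yi + 1) 0) =
      (row.drop 1).take m := by
  apply List.ext_getElem
  · simp [PySem.List.length_pyRange_one]; omega
  · intro i h1 h2
    have hlen : (PySem.List.pyRange 0 ((m : Nat) : Int) 1).length = m := by
      simp [PySem.List.length_pyRange_one]
    have hi : i < m := by rw [List.length_map, hlen] at h1; exact h1
    have hirow : i + 1 < row.length := by omega
    rw [List.getElem_map, PySem.List.getElem_pyRange_one]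
    have hc : (0 : Int) + (i : Int) + 1 = ((i + 1 : Nat) : Int) := by push_cast; ring
    rw [hc, PySem.List.pyGetD_natCast, List.getD_eq_getElem _ _ hirow]
    simp

theorem pv_flatlen (n : Nat) (rows : List (List Int)) (h : ∀ r ∈ rows, r.length = n) :
    rows.flatten.length = n * rows.length := by
  induction rows with
  | nil => simp
  | cons r rest ih =>
      simp only [List.flatten_cons, List.length_append, List.length_cons,
        h r (List.mem_cons_self), ih (fun r hr => h r (List.mem_cons_of_mem _ hr))]
      ring

theorem pv_reshape_count (n k : Nat) (hn : 0 < n) :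
    PySem.List.pyRange 0 ((n * k : Nat) : Int) (n : Int) =
      (List.range k).map (fun j => ((n * j : Nat) : Int)) := by
  rw [PySem.List.pyRange_of_pos _ _ (by exact_mod_cast hn)]
  have hc : (if (0:Int) < ((n * k : Nat) : Int) then ((((n * k : Nat) : Int) - 0 + (n:Int) - 1) / (n:Int)).toNat else 0) = k := by
    rcases Nat.eq_zero_or_pos k with hk | hk
    · subst hk; simp
    · rw [if_pos (by exact_mod_cast Nat.mul_pos hn hk)]
      have h2 : ((n * k : Nat) : Int) - 0 + (n : Int) - 1 = ((n : Int) - 1) + (n : Int) * k := by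
        push_cast; ring
      rw [h2, Int.add_mul_ediv_left _ _ (by exact_mod_cast hn.ne' : (n:Int) ≠ 0),
          Int.ediv_eq_zero_of_lt (by omega) (by omega)]
      omega
  rw [hc]
  apply List.map_congr_left
  intro j _
  push_cast; ring

theorem pv_chunks (n : Nat) (rows : List (List Int)) (h : ∀ r ∈ rows, r.length = n) :
    (List.range rows.length).map (fun j => (rows.flatten.drop (n * j)).take n) = rows := by
  induction rows with
  | nil => simp
  | cons r rest ih =>
      have hr : r.length = n := h r List.mem_cons_self
      have hrest := ih (fun r hr => h r (List.mem_cons_of_mem _ hr))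
      simp only [List.length_cons, List.range_succ_eq_map, List.map_cons, List.map_map,
        List.flatten_cons, Nat.mul_zero, List.drop_zero]
      congr 1
      · rw [← hr, List.take_left]
      · calc List.map ((fun j => (((r ++ rest.flatten).drop (n * j)).take n)) ∘ Nat.succ)
              (List.range rest.length)
            = List.map (fun j => ((rest.flatten.drop (n * j)).take n)) (List.range rest.length) := by
              apply List.map_congr_left
              intro j _
              have h1 : r.drop (n * (j + 1)) = [] :=
                List.drop_eq_nil_of_le (by rw [hr]; nlinarith)
              have h2 : n * (j + 1) - r.length = n * j := by rw [hr]; ring_nf; omega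
              simp [Function.comp, List.drop_append, h1, h2]
          _ = rest := hrest

theorem pv_reshape (n : Nat) (hn : 0 < n) (rows : List (List Int)) (h : ∀ r ∈ rows, r.length = n) :
    (PySem.List.pyRange 0 (rows.flatten.length : Int) (n : Int)).foldl
      (fun m xi => m ++ [PySem.List.slice rows.flatten (some xi) (some (xi + (n : Int)))]) [] = rows := by
  rw [pv_flatlen n rows h, pv_reshape_count n rows.length hn, List.foldl_map,
      PySem.List.foldl_append_singleton_eq_map, List.nil_append]
  calc (List.range rows.length).map
        (fun j => PySem.List.slice rows.flatten (some ((n * j : Nat) : Int)) (some (((n * j : Nat) : Int) + (n : Int))))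
      = (List.range rows.length).map (fun j => (rows.flatten.drop (n * j)).take n) := by
        apply List.map_congr_left
        intro j _
        rw [PySem.List.slice_natCast_add]
    _ = rows := pv_chunks n rows h


-- ===== VERDICT (by name: the statement is the Claim_ definition above) =====
theorem right_neighbours_spec : Claim_equal_right_neighbours := by
  intro board size x y _ hpre
  unfold Spec_right_neighbours right_neighbours right_neighbours_alt
  obtain ⟨hne, hpos⟩ := hpre
  rcases lt_or_gt_of_ne hne with hneg | hposz
  · -- size < 0: both loops run over an empty range and both sides are []
    rw [PySem.List.pyRange_one_eq_nil (le_of_lt hneg)]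
    simp [PySem.List.pyRange]
  · -- size > 0
    obtain ⟨hlen, hrows⟩ := hpos hposz
    obtain ⟨n, rfl⟩ : ∃ n : Nat, size = (n : Nat) := ⟨size.toNat, (Int.toNat_of_nonneg hposz.le).symm⟩
    have hn : 0 < n := by exact_mod_cast hposz
    have hrowlen : ∀ k, k < n → n ≤ (board.getD k []).length := by
      intro k hk
      have hkb : k < board.length := by
        have : (k : Int) < (board.length : Int) := lt_of_lt_of_le (by exact_mod_cast hk) hlen
        exact_mod_cast this
      have hkn : k < ((n : Int)).toNat := by simpa using hk
      have hgt : (board.take ((n : Int)).toNat)[k]'(by simp [List.length_take]; omega) = board[k] :=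
        List.getElem_take
      have hmem : board[k] ∈ board.take ((n : Int)).toNat := by
        rw [← hgt]; exact List.getElem_mem _
      have := hrows _ hmem
      rw [List.getD_eq_getElem _ _ hkb]
      exact_mod_cast this

    have hs1 : ((n : Int) - 1) = ((n - 1 : Nat) : Int) := by omega
    -- the rows B produces
    set rows : List (List Int) :=
      (List.range n).map (fun k => ((board.getD k []).drop 1).take (n - 1) ++ [0]) with hrowsdef
    have hrows_len : ∀ r ∈ rows, r.length = n := by
      intro r hr
      rw [hrowsdef] at hr
      simp only [List.mem_map, List.mem_range] at hr
      obtain ⟨k, hk, rfl⟩ := hr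
      have := hrowlen k hk
      simp only [List.getD] at this ⊢
      simp only [List.length_append, List.length_take, List.length_drop, List.length_cons,
        List.length_nil]
      omega
    -- B's result is rows
    have hB : (PySem.List.pyRange 0 (n : Int) 1).foldl (fun result i =>
        result ++ [PySem.List.slice (PySem.List.pyGetD board i []) (some 1) (some (n : Int)) ++ [0]]) [] = rows := by
      rw [PySem.List.foldl_append_singleton_eq_map, List.nil_append,
          PySem.List.pyRange_zero_natCast, List.map_map, hrowsdef]
      apply List.map_congr_left
      intro k hk
      simp only [Function.comp_apply, PySem.List.pyGetD_natCast]
      congr 1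
      have h1 : (1 : Int) = ((1 : Nat) : Int) := rfl
      rw [h1, PySem.List.slice_natCast]
    -- A's flat list is rows.flatten
    have hA : (PySem.List.pyRange 0 (n : Int) 1).foldl (fun acc xi =>
        ((PySem.List.pyRange 0 ((n : Int) - 1) 1).foldl (fun acc2 yi =>
            acc2 ++ [PySem.List.pyGetD (PySem.List.pyGetD board xi []) (yi + 1) 0]) acc) ++ [0]) []
        = rows.flatten := by
      simp only [PySem.List.foldl_append_singleton_eq_map, List.append_assoc]
      rw [PySem.List.foldl_append_eq_flatMap, List.nil_append, PySem.List.pyRange_zero_natCast,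
          List.flatMap_map, hrowsdef, ← List.flatMap_def]
      apply List.flatMap_congr
      intro k hk
      simp only [List.mem_range] at hk
      simp only [PySem.List.pyGetD_natCast]
      congr 1
      rw [hs1]
      exact pv_rowvals _ _ (by have := hrowlen k hk; omega)
    rw [hA, hB]
    have hflat : (rows.flatten.length : Int) = ((rows.flatten.length : Nat) : Int) := rfl
    exact pv_reshape n hn rows hrows_len
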